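-- pv_equiv track=rewrite | github.com/Jaleksi/clidash | dashcli/blocks/korona_block.py | fill_zero_values_in_data
-- ===== SOURCE A (Python) =====
-- def fill_zero_values_in_data(data):
--     zeroes_in_queue = []
--     last_numeric_value = 0
--
--     for i, val in enumerate(data):
--         if val == 0:
--             zeroes_in_queue.append(i)
--             if i != len(data) - 1:
--                 continue
--
--         if not zeroes_in_queue:
--             last_numeric_value = val
--             continue
--
--         last_numeric_value = val if last_numeric_value == 0 else last_numeric_value
--         fill_step = (last_numeric_value - val) // (len(zeroes_in_queue) + 1)
--
--         for j, zero_index in enumerate(zeroes_in_queue):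
--             data[zero_index] = last_numeric_value - fill_step * (j + 1)
--
--         last_numeric_value = val
--         zeroes_in_queue = []
--
--     return data
-- ===== SOURCE B (Python) =====
-- def fill_zero_values_in_data(data):
--     # Staged passes: precompute each index's previous/next nonzero neighbour
--     # (value, index), then fill every zero by a per-index closed formula.
--     n = len(data)
--     prv = []
--     pv, pi = 0, -1
--     for k, v in enumerate(data):
--         prv.append((pv, pi))
--         if v != 0:
--             pv, pi = v, k
--     nxt = []
--     nv, ni = 0, n
--     k = n - 1
--     for v in reversed(data):
--         nxt.append((nv, ni))
--         if v != 0: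
--             nv, ni = v, k
--         k -= 1
--     nxt.reverse()
--     out = []
--     for k, (v, (pv, pi), (nv, ni)) in enumerate(zip(data, prv, nxt)):
--         if v != 0:
--             out.append(v)
--         else:
--             l = nv if pv == 0 else pv
--             step = (l - nv) // (ni - pi)
--             out.append(l - step * (k - pi))
--     data[:] = out
--     return data
-- ===== Notes on version B (the rewrite author's own statement) =====
-- stated objective: alternative
-- what changed: A scans once, queueing zero indices and flushing the queue with in-place writes when each run closes; B instead precomputes, in a forward and a backward staged pass, the previous/next nonzero neighbour (value, index) of every position, and then fills each zero independently by a per-index closed formula using those arrays.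
import Mathlib
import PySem

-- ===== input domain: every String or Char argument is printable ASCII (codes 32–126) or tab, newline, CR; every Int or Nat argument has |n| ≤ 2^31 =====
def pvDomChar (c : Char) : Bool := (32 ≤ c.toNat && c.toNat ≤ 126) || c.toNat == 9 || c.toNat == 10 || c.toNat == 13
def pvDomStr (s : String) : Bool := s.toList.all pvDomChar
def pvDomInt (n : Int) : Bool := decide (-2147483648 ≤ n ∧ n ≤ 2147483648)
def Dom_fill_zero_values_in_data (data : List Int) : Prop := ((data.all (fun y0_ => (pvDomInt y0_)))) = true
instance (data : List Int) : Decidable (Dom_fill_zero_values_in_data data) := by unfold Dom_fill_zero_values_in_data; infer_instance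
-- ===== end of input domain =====

-- B replaces A's single-pass zero-index queue (flushed with in-place writes when a run closes)
-- by staged passes: precompute every position's previous/next nonzero neighbour (value, index)
-- in a forward and a backward pass, then fill each zero independently by a per-index formula.
-- (Python A and B both mutate `data` in place to the same final contents; the theorem is about the returned list.)

-- ===== PORT A =====
-- loop body of A's `for i, val in enumerate(data)` (named helper; the Python body verbatim).
-- `data[zero_index] = …` is PySem.List.pySetD: every queued index is a valid index of d.
def fillA_step (n : Int) (s : List Int × List Int × Int) (p : Int × Int) :
    List Int × List Int × Int :=
  let d := s.1
  let zeroes := s.2.1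
  let last := s.2.2
  let i := p.1
  let val := p.2
  let zeroes := if val = 0 then zeroes ++ [i] else zeroes
  if val = 0 ∧ i ≠ n - 1 then (d, zeroes, last)
  else if zeroes = [] then (d, zeroes, val)
  else
    let last := if last = 0 then val else last
    let fill_step := PySem.Int.floordiv (last - val) ((zeroes.length : Int) + 1)
    let d := (PySem.List.enumerate zeroes 0).foldl
      (fun dd (q : Int × Int) => PySem.List.pySetD dd q.2 (last - fill_step * (q.1 + 1))) d
    (d, [], val)

def fill_zero_values_in_data (data : List Int) : List Int :=
  ((PySem.List.enumerate data 0).foldl (fillA_step (data.length : Int))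
    (data, ([] : List Int), (0 : Int))).1

-- ===== PORT B =====
-- first pass: `prv.append((pv, pi)); if v != 0: pv, pi = v, k` — k is the running index
def prevScan : List Int → Int → Int → Int → List (Int × Int)
  | [], _, _, _ => []
  | v :: xs, k, pv, pi =>
      (pv, pi) :: prevScan xs (k + 1) (if v ≠ 0 then v else pv) (if v ≠ 0 then k else pi)

-- second pass over `reversed(data)` with k counting down (the list is python's `nxt` before `nxt.reverse()`)
def nextScan : List Int → Int → Int → Int → List (Int × Int)
  | [], _, _, _ => []
  | v :: xs, k, nv, ni =>
      (nv, ni) :: nextScan xs (k - 1) (if v ≠ 0 then v else nv) (if v ≠ 0 then k else ni)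

-- third pass: walk data with prv and nxt in step (python's zip), k the running index
def fillOut : List Int → List (Int × Int) → List (Int × Int) → Int → List Int
  | v :: xs, p :: prv, q :: nxt, k =>
      (if v ≠ 0 then v
       else
         let l := if p.1 = 0 then q.1 else p.1
         let step := PySem.Int.floordiv (l - q.1) (q.2 - p.2)
         l - step * (k - p.2)) :: fillOut xs prv nxt (k + 1)
  | _, _, _, _ => []

def fill_zero_values_in_data_alt (data : List Int) : List Int :=
  fillOut data (prevScan data 0 0 (-1))
    ((nextScan data.reverse ((data.length : Int) - 1) 0 (data.length : Int)).reverse) 0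

-- ===== PRECONDITION & SPEC =====
def Spec_fill_zero_values_in_data (data : List Int) (out : List Int) : Prop := out = fill_zero_values_in_data_alt data
instance (data : List Int) (out : List Int) : Decidable (Spec_fill_zero_values_in_data data out) := by unfold Spec_fill_zero_values_in_data; infer_instance

-- ===== CLAIM (what is proved, stated in full; the proofs are below) =====
def Claim_equal_fill_zero_values_in_data : Prop := ∀ (data : List Int), Dom_fill_zero_values_in_data data → Spec_fill_zero_values_in_data data (fill_zero_values_in_data data)

-- ===== LEMMAS AND PROOFS =====

-- PROOF-SIDE DEVICE: a run-at-a-time scan of the input; both ports are proved equal to it.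
-- inner zero-skip (fuel only makes the recursion structural)
def bSkip (a : List Int) (n : Int) : Nat → Int → Int
  | 0, j => j
  | fuel + 1, j =>
    if j < n ∧ PySem.List.pyGetD a j 0 = 0 then bSkip a n fuel (j + 1) else j

def bLoop (a : List Int) (n : Int) : Nat → Int → Int → List Int → List Int
  | 0, _, _, out => out
  | fuel + 1, i, left, out =>
    if i < n then
      let v := PySem.List.pyGetD a i 0
      if v ≠ 0 then bLoop a n fuel (i + 1) v (out ++ [v])
      else
        let j := bSkip a n (fuel + 1) i
        let right := if j < n then PySem.List.pyGetD a j 0 else 0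
        let l := if left = 0 then right else left
        let step := PySem.Int.floordiv (l - right) (j - i + 1)
        bLoop a n fuel j right
          (out ++ (PySem.List.pyRange 0 (j - i) 1).map (fun k => l - step * (k + 1)))
    else out

-- `right` of the run that starts at i (the value the scan reads past the run)
def bRight (a : List Int) (n : Int) (fuel : Nat) (i : Int) : Int :=
  if bSkip a n fuel i < n then PySem.List.pyGetD a (bSkip a n fuel i) 0 else 0

-- the zero-skip never moves left
theorem bSkip_ge (a : List Int) (n : Int) : ∀ (fuel : Nat) (j : Int), j ≤ bSkip a n fuel j := by
  intro fuel
  induction fuel with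
  | zero => intro j; exact le_rfl
  | succ f ih =>
    intro j
    rw [bSkip]
    by_cases hc : j < n ∧ PySem.List.pyGetD a j 0 = 0
    · rw [if_pos hc]; have := ih (j + 1); omega
    · rw [if_neg hc]

theorem bSkip_gt (a : List Int) (n : Int) (fuel : Nat) (i : Int) (hf : 1 ≤ fuel)
    (h1 : i < n) (h2 : PySem.List.pyGetD a i 0 = 0) : i + 1 ≤ bSkip a n fuel i := by
  obtain ⟨f, rfl⟩ : ∃ f, fuel = f + 1 := ⟨fuel - 1, by omega⟩
  rw [bSkip, if_pos ⟨h1, h2⟩]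
  exact bSkip_ge a n f (i + 1)

-- any sufficient fuel computes the same skip
theorem bSkip_irrel (a : List Int) (n : Int) :
    ∀ (f1 f2 : Nat) (j : Int), (n - j).toNat ≤ f1 → (n - j).toNat ≤ f2 →
      bSkip a n f1 j = bSkip a n f2 j := by
  intro f1
  induction f1 with
  | zero =>
    intro f2 j h1 h2
    cases f2 with
    | zero => rfl
    | succ f2 => rw [bSkip, bSkip, if_neg (fun h => absurd h.1 (by omega))]
  | succ f1 ih =>
    intro f2 j h1 h2
    cases f2 with
    | zero => rw [bSkip, bSkip, if_neg (fun h => absurd h.1 (by omega))]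
    | succ f2 =>
      rw [bSkip, bSkip]
      by_cases hc : j < n ∧ PySem.List.pyGetD a j 0 = 0
      · rw [if_pos hc, if_pos hc]
        exact ih f2 (j + 1) (by omega) (by omega)
      · rw [if_neg hc, if_neg hc]

-- one-step unfolding equations of bLoop
theorem bLoop_stop (a : List Int) (n : Int) (fuel : Nat) (i left : Int) (out : List Int)
    (hi : ¬ i < n) : bLoop a n fuel i left out = out := by
  cases fuel with
  | zero => rfl
  | succ f => rw [bLoop, if_neg hi]

theorem bLoop_succ_nz (a : List Int) (n : Int) (f : Nat) (i left : Int) (out : List Int)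
    (hi : i < n) (hv : PySem.List.pyGetD a i 0 ≠ 0) :
    bLoop a n (f + 1) i left out
      = bLoop a n f (i + 1) (PySem.List.pyGetD a i 0) (out ++ [PySem.List.pyGetD a i 0]) := by
  rw [bLoop, if_pos hi]
  simp only [if_pos hv]

theorem bLoop_succ_z (a : List Int) (n : Int) (f : Nat) (i left : Int) (out : List Int)
    (hi : i < n) (hv : PySem.List.pyGetD a i 0 = 0) :
    bLoop a n (f + 1) i left out
      = bLoop a n f (bSkip a n (f + 1) i) (bRight a n (f + 1) i)
          (out ++ (PySem.List.pyRange 0 (bSkip a n (f + 1) i - i) 1).map (fun k =>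
            (if left = 0 then bRight a n (f + 1) i else left)
              - PySem.Int.floordiv
                  ((if left = 0 then bRight a n (f + 1) i else left) - bRight a n (f + 1) i)
                  (bSkip a n (f + 1) i - i + 1) * (k + 1))) := by
  rw [bLoop, if_pos hi]
  simp only [bRight, hv, ne_eq, not_true_eq_false, ite_false]

-- any sufficient fuel computes the same loop
theorem bLoop_irrel (a : List Int) (n : Int) :
    ∀ (f1 f2 : Nat) (i left : Int) (out : List Int),
      (n - i).toNat ≤ f1 → (n - i).toNat ≤ f2 →
      bLoop a n f1 i left out = bLoop a n f2 i left out := by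
  intro f1
  induction f1 with
  | zero =>
    intro f2 i left out h1 h2
    rw [bLoop_stop a n f2 i left out (by omega)]
    rfl
  | succ f1 ih =>
    intro f2 i left out h1 h2
    by_cases hi : i < n
    · cases f2 with
      | zero => omega
      | succ f2 =>
        by_cases hv : PySem.List.pyGetD a i 0 = 0
        · rw [bLoop_succ_z a n f1 i left out hi hv, bLoop_succ_z a n f2 i left out hi hv]
          have hj : bSkip a n (f1 + 1) i = bSkip a n (f2 + 1) i :=
            bSkip_irrel a n (f1 + 1) (f2 + 1) i (by omega) (by omega)
          have hjr : bRight a n (f1 + 1) i = bRight a n (f2 + 1) i := by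
            rw [bRight, bRight, hj]
          rw [hj, hjr]
          have hge := bSkip_gt a n (f2 + 1) i (by omega) hi hv
          exact ih f2 _ _ _ (by omega) (by omega)
        · rw [bLoop_succ_nz a n f1 i left out hi hv, bLoop_succ_nz a n f2 i left out hi hv]
          exact ih f2 _ _ _ (by omega) (by omega)
    · rw [bLoop_stop a n (f1 + 1) i left out hi, bLoop_stop a n f2 i left out hi]

-- the unfolding equations at an unchanged (sufficient) fuel
theorem bLoop_nz (a : List Int) (n : Int) (fuel : Nat) (i left : Int) (out : List Int)
    (hf : (n - i).toNat ≤ fuel) (hi : i < n) (hv : PySem.List.pyGetD a i 0 ≠ 0) :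
    bLoop a n fuel i left out
      = bLoop a n fuel (i + 1) (PySem.List.pyGetD a i 0) (out ++ [PySem.List.pyGetD a i 0]) := by
  obtain ⟨f, rfl⟩ : ∃ f, fuel = f + 1 := ⟨fuel - 1, by omega⟩
  rw [bLoop_succ_nz a n f i left out hi hv]
  exact bLoop_irrel a n f (f + 1) (i + 1) _ _ (by omega) (by omega)

theorem bLoop_z (a : List Int) (n : Int) (fuel : Nat) (i left : Int) (out : List Int)
    (hf : (n - i).toNat ≤ fuel) (hi : i < n) (hv : PySem.List.pyGetD a i 0 = 0) :
    bLoop a n fuel i left out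
      = bLoop a n fuel (bSkip a n fuel i) (bRight a n fuel i)
          (out ++ (PySem.List.pyRange 0 (bSkip a n fuel i - i) 1).map (fun k =>
            (if left = 0 then bRight a n fuel i else left)
              - PySem.Int.floordiv
                  ((if left = 0 then bRight a n fuel i else left) - bRight a n fuel i)
                  (bSkip a n fuel i - i + 1) * (k + 1))) := by
  obtain ⟨f, rfl⟩ : ∃ f, fuel = f + 1 := ⟨fuel - 1, by omega⟩
  rw [bLoop_succ_z a n f i left out hi hv]
  have hge := bSkip_gt a n (f + 1) i (by omega) hi hv
  exact bLoop_irrel a n f (f + 1) _ _ _ (by omega) (by omega)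

-- the accumulator of bLoop only ever grows on the right
theorem bLoop_append_bound (a : List Int) (n : Int) :
    ∀ (bound fuel : Nat) (i left : Int) (out : List Int),
      (n - i).toNat ≤ bound → (n - i).toNat ≤ fuel →
      bLoop a n fuel i left out = out ++ bLoop a n fuel i left [] := by
  intro bound
  induction bound with
  | zero =>
    intro fuel i left out h hf
    rw [bLoop_stop a n fuel i left out (by omega), bLoop_stop a n fuel i left [] (by omega)]
    simp
  | succ b ih =>
    intro fuel i left out h hf
    by_cases hi : i < n
    · by_cases hv : PySem.List.pyGetD a i 0 = 0
      · have hge := bSkip_gt a n fuel i (by omega) hi hv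
        rw [bLoop_z a n fuel i left out hf hi hv, bLoop_z a n fuel i left [] hf hi hv]
        rw [ih fuel (bSkip a n fuel i) _ _ (by omega) (by omega),
          ih fuel (bSkip a n fuel i) _ (([] : List Int) ++ _) (by omega) (by omega)]
        simp
      · rw [bLoop_nz a n fuel i left out hf hi hv, bLoop_nz a n fuel i left [] hf hi hv]
        rw [ih fuel (i + 1) _ _ (by omega) (by omega),
          ih fuel (i + 1) _ (([] : List Int) ++ _) (by omega) (by omega)]
        simp
    · rw [bLoop_stop a n fuel i left out hi, bLoop_stop a n fuel i left [] hi]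
      simp

theorem bLoop_append (a : List Int) (n : Int) (fuel : Nat) (i left : Int) (out : List Int)
    (hf : (n - i).toNat ≤ fuel) :
    bLoop a n fuel i left out = out ++ bLoop a n fuel i left [] :=
  bLoop_append_bound a n (n - i).toNat fuel i left out le_rfl hf

-- characterization of the zero-skip: it stops exactly at the first non-zero (or the end)
theorem bSkip_spec (a : List Int) (i m : Nat) (fuel : Nat) (him : i ≤ m) (hm : m ≤ a.length)
    (hfuel : m - i ≤ fuel)
    (hz : ∀ k : Nat, i ≤ k → k < m → a.getD k 0 = 0)
    (hstop : m = a.length ∨ a.getD m 0 ≠ 0) :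
    bSkip a (a.length : Int) fuel (i : Int) = (m : Int) := by
  induction hd : m - i generalizing i fuel with
  | zero =>
    have him' : i = m := by omega
    subst him'
    cases fuel with
    | zero => rfl
    | succ f =>
      rw [bSkip, if_neg]
      intro hcon
      rcases hstop with he | hne
      · rw [he] at hcon; exact absurd hcon.1 (by omega)
      · have hmlen : i < a.length := by exact_mod_cast hcon.1
        rw [PySem.List.pyGetD_natCast] at hcon
        exact hne hcon.2
  | succ f ih =>
    have hilt : i < m := by omega
    obtain ⟨fu, rfl⟩ : ∃ fu, fuel = fu + 1 := ⟨fuel - 1, by omega⟩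
    rw [bSkip, if_pos]
    · rw [show (i : Int) + 1 = ((i + 1 : Nat) : Int) by push_cast; ring]
      exact ih (i + 1) fu (by omega) (by omega) (fun k hk1 hk2 => hz k (by omega) hk2) (by omega)
    · constructor
      · omega
      · simpa [PySem.List.pyGetD_natCast] using hz i le_rfl hilt

-- values agree from position s on, as getD
theorem pv_drop_getD (d a : List Int) (s k : Nat) (h : d.drop s = a.drop s) (hk : s ≤ k) :
    d.getD k 0 = a.getD k 0 := by
  have h0 := congrArg (fun l => l[k - s]?) h
  simp only [List.getElem?_drop] at h0
  rw [Nat.add_sub_cancel' hk] at h0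
  simp [List.getD_eq_getElem?_getD, h0]

-- a comprehension over range(c) (Nat form)
theorem pv_pyRange_zero_map (c : Nat) (f : Int → Int) :
    (PySem.List.pyRange 0 (c : Int) 1).map f = (List.range c).map (fun (j : Nat) => f (j : Int)) := by
  induction c with
  | zero => simp [PySem.List.pyRange_one_eq_nil]
  | succ c ih =>
    rw [show ((c + 1 : Nat) : Int) = (c : Int) + 1 by push_cast; ring,
      PySem.List.pyRange_one_succ_right (by positivity), List.range_succ]
    simp [ih]

-- set at the junction of an append
theorem pv_set_append_cons (l1 : List Int) (x v : Int) (l2 : List Int) (m : Nat)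
    (hm : m = l1.length) : (l1 ++ x :: l2).set m v = l1 ++ v :: l2 := by
  subst hm
  induction l1 with
  | nil => rfl
  | cons y t ihl => simp [ihl]

-- A's inner fill loop writes the c values g 1, …, g c at positions s, …, s+c-1
theorem fillA_inner (g : Int → Int) :
    ∀ (c s : Nat) (d : List Int), s + c ≤ d.length →
    (PySem.List.enumerate (PySem.List.pyRange (s : Int) ((s : Int) + (c : Int)) 1) 0).foldl
      (fun dd (q : Int × Int) => PySem.List.pySetD dd q.2 (g (q.1 + 1))) d
    = d.take s ++ (List.range c).map (fun (j : Nat) => g ((j : Int) + 1)) ++ d.drop (s + c) := by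
  intro c
  induction c with
  | zero =>
    intro s d h
    rw [show ((s : Int) + ((0 : Nat) : Int)) = (s : Int) by push_cast; ring]
    rw [PySem.List.pyRange_one_eq_nil le_rfl]
    simp [PySem.List.enumerate_nil]
  | succ c ih =>
    intro s d h
    rw [show ((s : Int) + ((c + 1 : Nat) : Int)) = ((s : Int) + (c : Int)) + 1 by push_cast; ring]
    rw [PySem.List.pyRange_one_succ_right (by omega)]
    rw [PySem.List.enumerate_append, List.foldl_append]
    rw [ih s d (by omega)]
    rw [PySem.List.enumerate_cons, PySem.List.enumerate_nil, List.foldl_cons, List.foldl_nil]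
    have hlen : (PySem.List.pyRange (s : Int) ((s : Int) + (c : Int)) 1).length = c := by
      rw [PySem.List.length_pyRange_one]; omega
    rw [hlen]
    have hsc : s + c < d.length := by omega
    rw [show ((s : Int) + (c : Int)) = ((s + c : Nat) : Int) by push_cast; ring]
    rw [PySem.List.pySetD_natCast]
    rw [List.drop_eq_getElem_cons hsc]
    rw [pv_set_append_cons _ _ _ _ (s + c) (by simp [List.length_take]; omega)]
    simp [List.range_succ, List.append_assoc]
    omega


-- the three reduced forms of A's loop body
theorem stepA_enqueue (n : Int) (d q : List Int) (last i val : Int)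
    (hv : val = 0) (hni : i ≠ n - 1) :
    fillA_step n (d, q, last) (i, val) = (d, q ++ [i], last) := by
  simp only [fillA_step]
  rw [if_pos hv, if_pos ⟨hv, hni⟩]

theorem stepA_nonzero_empty (n : Int) (d : List Int) (last i val : Int) (hv : val ≠ 0) :
    fillA_step n (d, [], last) (i, val) = (d, [], val) := by
  simp only [fillA_step]
  rw [if_neg hv, if_neg (fun h => hv h.1), if_pos rfl]

theorem stepA_flush_nz (n : Int) (d q : List Int) (last i val : Int)
    (hv : val ≠ 0) (hq : q ≠ []) :
    fillA_step n (d, q, last) (i, val) =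
      ((PySem.List.enumerate q 0).foldl (fun dd (p : Int × Int) => PySem.List.pySetD dd p.2
          ((if last = 0 then val else last)
            - PySem.Int.floordiv ((if last = 0 then val else last) - val) ((q.length : Int) + 1)
              * (p.1 + 1))) d,
        [], val) := by
  simp only [fillA_step]
  rw [if_neg hv, if_neg (fun h => hv h.1), if_neg hq]

theorem stepA_flush_z (n : Int) (d q : List Int) (last i : Int) (hi : i = n - 1) :
    fillA_step n (d, q, last) (i, 0) =
      ((PySem.List.enumerate (q ++ [i]) 0).foldl (fun dd (p : Int × Int) => PySem.List.pySetD dd p.2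
          ((if last = 0 then 0 else last)
            - PySem.Int.floordiv ((if last = 0 then 0 else last) - 0) (((q ++ [i]).length : Int) + 1)
              * (p.1 + 1))) d,
        [], 0) := by
  simp only [fillA_step, if_true, true_and]
  rw [if_neg (by simp [hi]), if_neg (by simp)]

-- the master invariant: from any run-boundary state, A's remaining fold computes what
-- the run-scan computes from the start of the pending run
theorem mainA (a : List Int) (t : List Int) :
    ∀ (s c : Nat) (d : List Int) (last : Int),
      t = a.drop (s + c) →
      (c = 0 ∨ s + c < a.length) →
      d.length = a.length →
      d.drop s = a.drop s →
      (∀ k : Nat, s ≤ k → k < s + c → a.getD k 0 = 0) →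
      ((PySem.List.enumerate t ((s : Int) + (c : Int))).foldl (fillA_step (a.length : Int))
          (d, PySem.List.pyRange (s : Int) ((s : Int) + (c : Int)) 1, last)).1
        = d.take s ++ bLoop a (a.length : Int) a.length (s : Int) last [] := by
  induction t with
  | nil =>
    intro s c d last ht h0 hd hds hz
    have hlen : a.length ≤ s + c := by
      have := congrArg List.length ht
      simp at this
      omega
    have hc : c = 0 := by rcases h0 with h | h; exact h; omega
    rw [PySem.List.enumerate_nil, List.foldl_nil]
    rw [bLoop_stop a _ _ _ _ _ (by omega)]
    simp [List.take_of_length_le (show d.length ≤ s by omega)]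
  | cons x t' ih =>
    intro s c d last ht h0 hd hds hz
    have hlen : s + c < a.length := by
      by_contra hcon
      rw [List.drop_eq_nil_iff.mpr (by omega)] at ht
      simp at ht
    rw [List.drop_eq_getElem_cons hlen] at ht
    have hx : a[s + c]'hlen = x := by
      have h7 := congrArg List.headI ht
      simp only [List.headI_cons] at h7
      exact h7.symm
    have ht' : t' = a.drop (s + c + 1) := by
      have h8 := congrArg List.tail ht
      simp only [List.tail_cons] at h8
      exact h8
    have hxg : a.getD (s + c) 0 = x := by
      rw [List.getD_eq_getElem?_getD, List.getElem?_eq_getElem hlen, hx]; rfl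
    rw [PySem.List.enumerate_cons, List.foldl_cons]
    by_cases hx0 : x = 0
    · subst hx0
      by_cases hb : s + c + 1 = a.length
      · -- trailing zero run reaching the end: A flushes with val = 0, the run-scan hits the end
        rw [stepA_flush_z _ _ _ _ _ (by omega)]
        have hq1 : PySem.List.pyRange (s : Int) ((s : Int) + (c : Int)) 1 ++ [(s : Int) + (c : Int)]
            = PySem.List.pyRange (s : Int) ((s : Int) + ((c + 1 : Nat) : Int)) 1 := by
          rw [show (s : Int) + ((c + 1 : Nat) : Int) = ((s : Int) + (c : Int)) + 1 by push_cast; ring]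
          exact (PySem.List.pyRange_one_succ_right (by omega)).symm
        rw [hq1]
        have hql : (PySem.List.pyRange (s : Int) ((s : Int) + ((c + 1 : Nat) : Int)) 1).length
            = c + 1 := by
          rw [PySem.List.length_pyRange_one]; omega
        rw [hql]
        rw [fillA_inner (fun tt => (if last = 0 then 0 else last)
              - PySem.Int.floordiv ((if last = 0 then 0 else last) - 0) (((c + 1 : Nat) : Int) + 1)
                * tt) (c + 1) s d (by omega)]
        rw [ht', show s + c + 1 = a.length from hb, List.drop_length,
          PySem.List.enumerate_nil, List.foldl_nil]
        rw [show s + (c + 1) = d.length by omega, List.drop_length]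
        have hvz : PySem.List.pyGetD a ((s : Nat) : Int) 0 = 0 := by
          rw [PySem.List.pyGetD_natCast]
          rcases Nat.eq_zero_or_pos c with h0c | h0c
          · have h6 := hxg; rw [show s + c = s by omega] at h6; exact h6
          · exact hz s le_rfl (by omega)
        rw [bLoop_z a _ a.length _ _ _ (by omega) (by omega) hvz]
        have hskip : bSkip a ((a.length : Nat) : Int) a.length ((s : Nat) : Int)
            = ((a.length : Nat) : Int) :=
          bSkip_spec a s a.length a.length (by omega) le_rfl (by omega)
            (fun k hk1 hk2 => by
              rcases Nat.lt_or_ge k (s + c) with hkc | hkc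
              · exact hz k hk1 hkc
              · rw [show k = s + c by omega]; exact hxg)
            (Or.inl rfl)
        simp only [bRight]
        rw [hskip]
        rw [if_neg (lt_irrefl _)]
        rw [bLoop_stop a _ _ _ _ _ (lt_irrefl _)]
        rw [show ((a.length : Int) - (s : Int)) = ((c + 1 : Nat) : Int) by push_cast; omega]
        rw [pv_pyRange_zero_map]
        simp
      · -- zero in the middle: A only enqueues the index
        rw [stepA_enqueue _ _ _ _ _ _ rfl (by omega)]
        rw [← PySem.List.pyRange_one_succ_right (show (s : Int) ≤ (s : Int) + (c : Int) by omega)]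
        rw [show ((s : Int) + (c : Int)) + 1 = (s : Int) + ((c + 1 : Nat) : Int) by push_cast; ring]
        exact ih s (c + 1) d last
          (by rw [ht']; congr 1)
          (Or.inr (by omega))
          hd hds
          (fun k hk1 hk2 => by
            rcases Nat.lt_or_ge k (s + c) with hkc | hkc
            · exact hz k hk1 hkc
            · rw [show k = s + c by omega]; exact hxg)
    · -- non-zero value: A flushes the queue (if any) and records last := val
      by_cases hc : c = 0
      · subst hc
        simp only [Nat.add_zero] at ht' hxg hlen
        simp only [Nat.cast_zero, add_zero]
        rw [PySem.List.pyRange_one_eq_nil le_rfl]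
        rw [stepA_nonzero_empty _ _ _ _ _ hx0]
        have hds1 : d.drop (s + 1) = a.drop (s + 1) := by
          have h2 := congrArg (List.drop 1) hds
          simpa [List.drop_drop, Nat.add_comm] using h2
        have ihh := ih (s + 1) 0 d x (by simpa using ht') (Or.inl rfl) hd hds1
          (fun k hk1 hk2 => absurd hk2 (by omega))
        simp only [Nat.cast_zero, add_zero, Nat.cast_add, Nat.cast_one] at ihh
        rw [PySem.List.pyRange_one_eq_nil le_rfl] at ihh
        rw [ihh]
        have hvx : PySem.List.pyGetD a ((s : Nat) : Int) 0 = x := by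
          rw [PySem.List.pyGetD_natCast]; exact hxg
        rw [bLoop_nz a ((a.length : Nat) : Int) a.length ((s : Nat) : Int) last [] (by omega)
          (by omega) (by rw [hvx]; exact hx0), hvx]
        rw [List.nil_append,
          bLoop_append a ((a.length : Nat) : Int) a.length (((s : Nat) : Int) + 1) x [x] (by omega)]
        have hs : s < d.length := by omega
        rw [List.take_succ_eq_append_getElem hs]
        have hdg : d[s]'hs = x := by
          have h3 := pv_drop_getD d a s s hds le_rfl
          rw [List.getD_eq_getElem?_getD, List.getElem?_eq_getElem hs, Option.getD_some] at h3
          rw [h3, hxg]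
        rw [hdg]
        simp [List.append_assoc]
      · -- non-zero value closing a pending zero run
        have hq : PySem.List.pyRange (s : Int) ((s : Int) + (c : Int)) 1 ≠ [] := by
          intro he
          have h4 := congrArg List.length he
          rw [PySem.List.length_pyRange_one] at h4
          simp at h4
          omega
        rw [stepA_flush_nz _ _ _ _ _ _ hx0 hq]
        have hql : (PySem.List.pyRange (s : Int) ((s : Int) + (c : Int)) 1).length = c := by
          rw [PySem.List.length_pyRange_one]; omega
        rw [hql]
        rw [fillA_inner (fun tt => (if last = 0 then x else last)
              - PySem.Int.floordiv ((if last = 0 then x else last) - x) ((c : Int) + 1) * tt)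
            c s d (by omega)]
        have hds2 : d.drop (s + c) = a.drop (s + c) := by
          have h5 := congrArg (List.drop c) hds
          simpa [List.drop_drop, Nat.add_comm] using h5
        set F := (List.range c).map (fun (j : Nat) =>
          (if last = 0 then x else last)
            - PySem.Int.floordiv ((if last = 0 then x else last) - x) ((c : Int) + 1)
              * ((j : Int) + 1)) with hF
        have hFlen : F.length = c := by simp [hF]
        have hpreflen : (d.take s ++ F).length = s + c := by
          simp [List.length_take, hFlen]; omega
        have hd2 : (d.take s ++ F ++ d.drop (s + c)).length = a.length := by
          simp [List.length_take, hFlen]; omega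
        have hds3 : (d.take s ++ F ++ d.drop (s + c)).drop (s + c + 1) = a.drop (s + c + 1) := by
          conv_lhs => rw [show s + c + 1 = (d.take s ++ F).length + 1 by rw [hpreflen]]
          rw [List.drop_length_add_append, hds2, List.drop_drop]
        have ihh := ih (s + c + 1) 0 (d.take s ++ F ++ d.drop (s + c)) x
          (by simpa using ht') (Or.inl rfl) hd2 hds3
          (fun k hk1 hk2 => absurd hk2 (by omega))
        simp only [Nat.cast_zero, add_zero, Nat.cast_add, Nat.cast_one] at ihh
        rw [PySem.List.pyRange_one_eq_nil le_rfl] at ihh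
        rw [ihh]
        have htake : (d.take s ++ F ++ d.drop (s + c)).take (s + c + 1)
            = d.take s ++ F ++ [x] := by
          rw [show s + c + 1 = (d.take s ++ F).length + 1 by rw [hpreflen]]
          rw [List.take_length_add_append]
          rw [hds2, List.drop_eq_getElem_cons hlen, hx]
          simp
        rw [htake]
        have hvz : PySem.List.pyGetD a ((s : Nat) : Int) 0 = 0 := by
          rw [PySem.List.pyGetD_natCast]
          exact hz s le_rfl (by omega)
        rw [bLoop_z a ((a.length : Nat) : Int) a.length ((s : Nat) : Int) last [] (by omega)
          (by omega) hvz]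
        have hskip : bSkip a ((a.length : Nat) : Int) a.length ((s : Nat) : Int)
            = ((s + c : Nat) : Int) :=
          bSkip_spec a s (s + c) a.length (by omega) (by omega) (by omega)
            (fun k hk1 hk2 => hz k hk1 hk2)
            (Or.inr (by rw [hxg]; exact hx0))
        simp only [bRight]
        rw [hskip]
        rw [if_pos (show ((s + c : Nat) : Int) < ((a.length : Nat) : Int) by omega)]
        have hvx : PySem.List.pyGetD a ((s + c : Nat) : Int) 0 = x := by
          rw [PySem.List.pyGetD_natCast]; exact hxg
        rw [hvx]
        rw [show ((s + c : Nat) : Int) - ((s : Nat) : Int) = ((c : Nat) : Int) by push_cast; ring]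
        rw [pv_pyRange_zero_map]
        rw [List.nil_append]
        rw [bLoop_append a ((a.length : Nat) : Int) a.length ((s + c : Nat) : Int) x _ (by omega)]
        rw [bLoop_nz a ((a.length : Nat) : Int) a.length ((s + c : Nat) : Int) x [] (by omega)
          (by omega) (by rw [hvx]; exact hx0), hvx]
        rw [List.nil_append,
          bLoop_append a ((a.length : Nat) : Int) a.length (((s + c : Nat) : Int) + 1) x [x]
            (by omega)]
        rw [show ((s + c : Nat) : Int) + 1 = ((s : Int) + (c : Int)) + 1 by push_cast; ring]
        simp [hF, List.append_assoc]

-- ==== bridge from B's staged arrays to the run-scan ====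

-- spec form of the next-neighbour array: first nonzero of the remainder, with fallback (nv, ni)
def firstNZG : List Int → Int → Int → Int → Int × Int
  | [], _, nv, ni => (nv, ni)
  | v :: xs, k, nv, ni => if v ≠ 0 then (v, k) else firstNZG xs (k + 1) nv ni

def nxtListG : List Int → Int → Int → Int → List (Int × Int)
  | [], _, _, _ => []
  | _ :: xs, k, nv, ni => firstNZG xs (k + 1) nv ni :: nxtListG xs (k + 1) nv ni

theorem firstNZG_snoc (x : Int) : ∀ (xs : List Int) (k nv ni : Int),
    firstNZG (xs ++ [x]) k nv ni
      = firstNZG xs k (if x ≠ 0 then x else nv) (if x ≠ 0 then k + (xs.length : Int) else ni) := by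
  intro xs
  induction xs with
  | nil =>
    intro k nv ni
    by_cases hx : x = 0 <;> simp [firstNZG, hx]
  | cons y ys ih =>
    intro k nv ni
    by_cases hy : y = 0
    · simp only [List.cons_append, firstNZG, hy, ne_eq, not_true_eq_false, ite_false]
      rw [ih (k + 1) nv ni]
      by_cases hx : x = 0
      · simp [hx]
      · simp only [hx, ne_eq, not_false_eq_true, ite_true]
        congr 1
        simp only [List.length_cons]
        push_cast; ring
    · simp [firstNZG, hy]

theorem nxtListG_snoc (x : Int) : ∀ (xs : List Int) (k nv ni : Int),
    nxtListG (xs ++ [x]) k nv ni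
      = nxtListG xs k (if x ≠ 0 then x else nv) (if x ≠ 0 then k + (xs.length : Int) else ni)
        ++ [(nv, ni)] := by
  intro xs
  induction xs with
  | nil =>
    intro k nv ni
    simp [nxtListG, firstNZG]
  | cons y ys ih =>
    intro k nv ni
    simp only [List.cons_append, nxtListG]
    rw [firstNZG_snoc x ys (k + 1) nv ni, ih (k + 1) nv ni]
    have harith : k + 1 + (ys.length : Int) = k + ((y :: ys).length : Int) := by
      simp only [List.length_cons]; push_cast; ring
    rw [harith]

theorem nextScan_rev : ∀ (xs : List Int) (k nv ni : Int),
    (nextScan xs.reverse (k + (xs.length : Int) - 1) nv ni).reverse = nxtListG xs k nv ni := by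
  intro xs
  induction xs using List.reverseRecOn with
  | nil => intro k nv ni; simp [nextScan, nxtListG]
  | append_singleton ys x ih =>
    intro k nv ni
    rw [List.reverse_append, List.reverse_singleton, List.singleton_append, nextScan]
    have hK : k + (((ys ++ [x]).length : Nat) : Int) - 1 = k + (ys.length : Int) := by
      simp; ring
    rw [hK, List.reverse_cons, nxtListG_snoc]
    congr 1
    have h10 : k + (ys.length : Int) - 1 = k + (ys.length : Int) - 1 := rfl
    exact ih k (if x ≠ 0 then x else nv) (if x ≠ 0 then k + (ys.length : Int) else ni)

-- prevScan over a zero run keeps its state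
theorem prevScan_replicate : ∀ (c : Nat) (rest : List Int) (k pv pi : Int),
    prevScan (List.replicate c 0 ++ rest) k pv pi
      = List.replicate c (pv, pi) ++ prevScan rest (k + (c : Int)) pv pi := by
  intro c
  induction c with
  | zero => intro rest k pv pi; simp
  | succ c ih =>
    intro rest k pv pi
    rw [List.replicate_succ, List.cons_append, prevScan]
    simp only [ne_eq, not_true_eq_false, ite_false]
    rw [ih rest (k + 1) pv pi, List.replicate_succ]
    have h11 : k + 1 + (c : Int) = k + ((c + 1 : Nat) : Int) := by push_cast; ring
    rw [h11]
    simp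

theorem firstNZG_replicate : ∀ (c : Nat) (rest : List Int) (k nv ni : Int),
    firstNZG (List.replicate c 0 ++ rest) k nv ni = firstNZG rest (k + (c : Int)) nv ni := by
  intro c
  induction c with
  | zero => intro rest k nv ni; simp
  | succ c ih =>
    intro rest k nv ni
    rw [List.replicate_succ, List.cons_append, firstNZG]
    simp only [ne_eq, not_true_eq_false, ite_false]
    rw [ih rest (k + 1) nv ni]
    congr 1
    push_cast; ring

theorem nxtListG_replicate : ∀ (c : Nat) (rest : List Int) (k nv ni : Int),
    nxtListG (List.replicate c 0 ++ rest) k nv ni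
      = List.replicate c (firstNZG rest (k + (c : Int)) nv ni)
        ++ nxtListG rest (k + (c : Int)) nv ni := by
  intro c
  induction c with
  | zero => intro rest k nv ni; simp
  | succ c ih =>
    intro rest k nv ni
    rw [List.replicate_succ, List.cons_append, nxtListG]
    rw [firstNZG_replicate c rest (k + 1) nv ni, ih rest (k + 1) nv ni]
    have : k + 1 + (c : Int) = k + ((c + 1 : Nat) : Int) := by push_cast; ring
    rw [this, List.replicate_succ]
    simp

-- fillOut over a zero run with constant neighbour pairs emits the run formula values
theorem fillOut_run : ∀ (c : Nat) (rest : List Int) (prv' nxt' : List (Int × Int))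
    (s pv pi nv ni : Int),
    fillOut (List.replicate c 0 ++ rest) (List.replicate c (pv, pi) ++ prv')
        (List.replicate c (nv, ni) ++ nxt') s
      = (List.range c).map (fun (m : Nat) =>
          (if pv = 0 then nv else pv)
            - PySem.Int.floordiv ((if pv = 0 then nv else pv) - nv) (ni - pi)
              * ((s + (m : Int)) - pi))
        ++ fillOut rest prv' nxt' (s + (c : Int)) := by
  intro c
  induction c with
  | zero => intro rest prv' nxt' s pv pi nv ni; simp
  | succ c ih =>
    intro rest prv' nxt' s pv pi nv ni
    rw [List.replicate_succ, List.replicate_succ, List.replicate_succ,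
      List.cons_append, List.cons_append, List.cons_append, fillOut]
    simp only [ne_eq, not_true_eq_false, ite_false]
    rw [ih rest prv' nxt' (s + 1) pv pi nv ni]
    rw [List.range_succ_eq_map]
    have harith : s + 1 + (c : Int) = s + ((c + 1 : Nat) : Int) := by push_cast; ring
    rw [harith]
    simp only [List.map_cons, List.map_map, List.cons_append, Nat.cast_zero, add_zero]
    congr 2
    · apply List.map_congr_left
      intro m _
      simp only [Function.comp]
      congr 2
      push_cast; ring

-- every list splits into its leading zero run and a remainder that is empty or starts nonzero
theorem exists_zero_split : ∀ (xs : List Int), ∃ (c : Nat) (rest : List Int),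
    xs = List.replicate c 0 ++ rest ∧ (rest = [] ∨ ∃ y ys, rest = y :: ys ∧ y ≠ 0) := by
  intro xs
  induction xs with
  | nil => exact ⟨0, [], by simp, Or.inl rfl⟩
  | cons x xs ih =>
    by_cases hx : x = 0
    · obtain ⟨c, rest, h1, h2⟩ := ih
      exact ⟨c + 1, rest, by rw [List.replicate_succ, List.cons_append, hx, h1], h2⟩
    · exact ⟨0, x :: xs, by simp, Or.inr ⟨x, xs, rfl, hx⟩⟩

theorem getD_drop_eq (a : List Int) (s m : Nat) :
    (a.drop s).getD m 0 = a.getD (s + m) 0 := by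
  simp [List.getD_eq_getElem?_getD, List.getElem?_drop]

theorem repl_getD_lt (rest : List Int) : ∀ (c m : Nat), m < c →
    (List.replicate c (0 : Int) ++ rest).getD m 0 = 0 := by
  intro c
  induction c with
  | zero => intro m h; omega
  | succ c ih =>
    intro m h
    cases m with
    | zero => simp [List.replicate_succ]
    | succ m =>
      rw [List.replicate_succ, List.cons_append]
      simpa using ih m (by omega)

theorem repl_getD_at (y : Int) (ys : List Int) : ∀ (c : Nat),
    (List.replicate c (0 : Int) ++ y :: ys).getD c 0 = y := by
  intro c
  induction c with
  | zero => simp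
  | succ c ih => rw [List.replicate_succ, List.cons_append]; exact ih

theorem repl_drop (y : Int) (ys : List Int) : ∀ (c : Nat),
    (List.replicate c (0 : Int) ++ y :: ys).drop (c + 1) = ys := by
  intro c
  induction c with
  | zero => simp
  | succ c ih => rw [List.replicate_succ, List.cons_append]; exact ih

-- the bridge: from any position s (with pi = s - 1 and pv the scan state there),
-- B's pointwise fill of the suffix equals the run-scan from s
theorem bridge (a : List Int) : ∀ (len : Nat) (xs : List Int) (s : Nat) (pv : Int),
    xs.length = len → xs = a.drop s → s ≤ a.length →
    fillOut xs (prevScan xs (s : Int) pv ((s : Int) - 1))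
        (nxtListG xs (s : Int) 0 (a.length : Int)) (s : Int)
      = bLoop a (a.length : Int) a.length (s : Int) pv [] := by
  intro len
  induction len using Nat.strong_induction_on with
  | _ len ih =>
    intro xs s pv hlen hxs hs
    cases xs with
    | nil =>
      have hsn : s = a.length := by
        have := congrArg List.length hxs
        simp [List.length_drop] at this
        omega
      subst hsn
      rw [bLoop_stop a _ _ _ _ _ (lt_irrefl _)]
      rfl
    | cons v xs' =>
      have hlen1 : xs'.length + 1 = a.length - s := by
        have h := congrArg List.length hxs
        simp at h
        omega
      have hlenlt : xs'.length + 1 = len := by simpa using hlen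
      have hslt : s < a.length := by omega
      by_cases hv : v = 0
      · -- leading zero run
        subst hv
        obtain ⟨c0, rest, hsplit, hrest⟩ := exists_zero_split xs'
        have hxs2 : (0 : Int) :: xs' = List.replicate (c0 + 1) 0 ++ rest := by
          rw [List.replicate_succ, List.cons_append, hsplit]
        set c := c0 + 1 with hc
        have hlen2 : xs'.length + 1 = c + rest.length := by
          have h := congrArg List.length hxs2
          simp [hc] at h ⊢
          omega
        have hscle : s + c ≤ a.length := by omega
        have hgz : ∀ k : Nat, s ≤ k → k < s + c → a.getD k 0 = 0 := by
          intro k hk1 hk2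
          have h1 : a.getD k 0 = (a.drop s).getD (k - s) 0 := by
            rw [getD_drop_eq a s (k - s)]; congr 1; omega
          rw [h1, ← hxs, hxs2]
          exact repl_getD_lt rest c (k - s) (by omega)
        have hstop : (s + c = a.length) ∨ a.getD (s + c) 0 ≠ 0 := by
          rcases hrest with hre | ⟨y, ys, hre, hy⟩
          · left
            rw [hre] at hlen2
            simp at hlen2
            omega
          · right
            have h2 : a.getD (s + c) 0 = y := by
              rw [← getD_drop_eq a s c, ← hxs, hxs2, hre]
              exact repl_getD_at y ys c
            rw [h2]; exact hy
        have hskip : bSkip a (a.length : Int) a.length (s : Int) = ((s + c : Nat) : Int) :=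
          bSkip_spec a s (s + c) a.length (by omega) hscle (by omega) hgz hstop
        have hvz : PySem.List.pyGetD a ((s : Nat) : Int) 0 = 0 := by
          rw [PySem.List.pyGetD_natCast]
          exact hgz s le_rfl (by omega)
        rw [bLoop_z a (a.length : Int) a.length ((s : Nat) : Int) pv [] (by omega)
          (by exact_mod_cast hslt) hvz]
        rcases hrest with hre | ⟨y, ys, hre, hy⟩
        · -- trailing run to the end of the list
          subst hre
          have hsn : s + c = a.length := by
            simp at hlen2
            omega
          have hcastn : ((s + c : Nat) : Int) = (a.length : Int) := by rw [hsn]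
          have hbr : bRight a (a.length : Int) a.length ((s : Nat) : Int) = 0 := by
            rw [bRight, hskip, if_neg]
            rw [hcastn]
            exact lt_irrefl _
          rw [hbr, hskip, List.nil_append]
          rw [bLoop_stop a (a.length : Int) a.length _ _ _ (by rw [hcastn]; exact lt_irrefl _)]
          rw [hxs2, prevScan_replicate, nxtListG_replicate]
          rw [show firstNZG [] ((s : Int) + (c : Int)) 0 (a.length : Int)
              = ((0 : Int), (a.length : Int)) from rfl]
          rw [fillOut_run]
          rw [show fillOut [] (prevScan [] ((s : Int) + (c : Int)) pv ((s : Int) - 1))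
              (nxtListG [] ((s : Int) + (c : Int)) 0 (a.length : Int)) ((s : Int) + (c : Int))
              = [] from rfl]
          rw [List.append_nil]
          rw [show ((s + c : Nat) : Int) - ((s : Nat) : Int) = (c : Int) by push_cast; ring]
          rw [pv_pyRange_zero_map]
          apply List.map_congr_left
          intro m hm
          have hni : (a.length : Int) - ((s : Int) - 1) = (c : Int) + 1 := by
            rw [← hcastn]; push_cast; ring
          rw [hni]
          congr 1
          ring
        · -- run closed by a nonzero value y at position s + c
          subst hre
          have hjlt : s + c < a.length := by
            simp at hlen2
            omega
          have hgy : a.getD (s + c) 0 = y := by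
            rw [← getD_drop_eq a s c, ← hxs, hxs2]
            exact repl_getD_at y ys c
          have hpy : PySem.List.pyGetD a ((s + c : Nat) : Int) 0 = y := by
            rw [PySem.List.pyGetD_natCast]; exact hgy
          have hbr : bRight a (a.length : Int) a.length ((s : Nat) : Int) = y := by
            rw [bRight, hskip, if_pos (by exact_mod_cast hjlt)]
            exact hpy
          rw [hbr, hskip, List.nil_append]
          rw [bLoop_append a (a.length : Int) a.length ((s + c : Nat) : Int) y _ (by omega)]
          rw [bLoop_nz a (a.length : Int) a.length ((s + c : Nat) : Int) y [] (by omega)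
            (by exact_mod_cast hjlt) (by rw [hpy]; exact hy), hpy, List.nil_append]
          rw [bLoop_append a (a.length : Int) a.length (((s + c : Nat) : Int) + 1) y [y] (by omega)]
          -- left side: run fill then one nonzero step then the IH
          rw [hxs2, prevScan_replicate, nxtListG_replicate]
          have hfz : firstNZG (y :: ys) ((s : Int) + (c : Int)) 0 (a.length : Int)
              = (y, (s : Int) + (c : Int)) := by
            simp [firstNZG, hy]
          rw [hfz, fillOut_run, prevScan]
          simp only [hy, ne_eq, not_false_eq_true, ite_true]
          rw [show nxtListG (y :: ys) ((s : Int) + (c : Int)) 0 (a.length : Int)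
              = firstNZG ys (((s : Int) + (c : Int)) + 1) 0 (a.length : Int)
                :: nxtListG ys (((s : Int) + (c : Int)) + 1) 0 (a.length : Int) from rfl]
          rw [fillOut]
          simp only [hy, ne_eq, not_false_eq_true, ite_true]
          have hys : ys = a.drop (s + c + 1) := by
            have hdd : a.drop (s + c + 1) = (a.drop s).drop (c + 1) := by
              rw [List.drop_drop]; rfl
            rw [hdd, ← hxs, hxs2]
            exact (repl_drop y ys c).symm
          have hlt : ys.length < len := by
            simp at hlen2
            omega
          have ihh := ih ys.length hlt ys (s + c + 1) y rfl hys (by omega)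
          rw [show ((s + c + 1 : Nat) : Int) = ((s : Int) + (c : Int)) + 1 by push_cast; ring] at ihh
          rw [show ((s : Int) + (c : Int)) + 1 - 1 = (s : Int) + (c : Int) by ring] at ihh
          rw [ihh]
          rw [show ((s + c : Nat) : Int) + 1 = ((s : Int) + (c : Int)) + 1 by push_cast; ring]
          rw [show ((s + c : Nat) : Int) - ((s : Nat) : Int) = (c : Int) by push_cast; ring]
          rw [pv_pyRange_zero_map]
          have hmap : (List.range c).map (fun (m : Nat) =>
                (if pv = 0 then y else pv)
                  - PySem.Int.floordiv ((if pv = 0 then y else pv) - y)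
                      (((s : Int) + (c : Int)) - ((s : Int) - 1))
                    * (((s : Int) + (m : Int)) - ((s : Int) - 1)))
              = (List.range c).map (fun (m : Nat) =>
                (if pv = 0 then y else pv)
                  - PySem.Int.floordiv ((if pv = 0 then y else pv) - y) ((c : Int) + 1)
                    * ((m : Int) + 1)) := by
            apply List.map_congr_left
            intro m hm
            rw [show ((s : Int) + (c : Int)) - ((s : Int) - 1) = (c : Int) + 1 by ring]
            congr 1
            ring
          rw [hmap]
          simp
      · -- nonzero head: one step on both sides
        have hgv : a.getD s 0 = v := by
          have h3 : (a.drop s).getD 0 0 = a.getD s 0 := by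
            rw [getD_drop_eq a s 0, Nat.add_zero]
          rw [← h3, ← hxs]
          rfl
        have hpy : PySem.List.pyGetD a ((s : Nat) : Int) 0 = v := by
          rw [PySem.List.pyGetD_natCast]; exact hgv
        rw [prevScan]
        simp only [hv, ne_eq, not_false_eq_true, ite_true]
        rw [show nxtListG (v :: xs') (s : Int) 0 (a.length : Int)
            = firstNZG xs' ((s : Int) + 1) 0 (a.length : Int)
              :: nxtListG xs' ((s : Int) + 1) 0 (a.length : Int) from rfl]
        rw [fillOut]
        simp only [hv, ne_eq, not_false_eq_true, ite_true]
        have hxs' : xs' = a.drop (s + 1) := by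
          have h4 := congrArg List.tail hxs
          simpa [List.tail_drop] using h4
        have ihh := ih xs'.length (by omega) xs' (s + 1) v rfl hxs' (by omega)
        rw [show ((s + 1 : Nat) : Int) = (s : Int) + 1 by push_cast; ring] at ihh
        rw [show (s : Int) + 1 - 1 = (s : Int) by ring] at ihh
        rw [ihh]
        rw [bLoop_nz a (a.length : Int) a.length ((s : Nat) : Int) pv [] (by omega)
          (by exact_mod_cast hslt) (by rw [hpy]; exact hv), hpy, List.nil_append]
        rw [bLoop_append a (a.length : Int) a.length (((s : Nat) : Int) + 1) v [v] (by omega)]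
        rfl

-- ===== VERDICT (by name: the statement is the Claim_ definition above) =====
theorem fill_zero_values_in_data_spec : Claim_equal_fill_zero_values_in_data := by
  unfold Claim_equal_fill_zero_values_in_data Spec_fill_zero_values_in_data
  intro data _
  have hA : fill_zero_values_in_data data = bLoop data (data.length : Int) data.length 0 0 [] := by
    unfold fill_zero_values_in_data
    have h := mainA data data 0 0 data 0 (by simp) (Or.inl rfl) rfl rfl
      (fun k hk1 hk2 => absurd hk2 (by omega))
    simp only [Nat.cast_zero, add_zero] at h
    rw [PySem.List.pyRange_one_eq_nil le_rfl] at h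
    simpa using h
  have hB : fill_zero_values_in_data_alt data
      = bLoop data (data.length : Int) data.length 0 0 [] := by
    unfold fill_zero_values_in_data_alt
    have hnx : (nextScan data.reverse ((data.length : Int) - 1) 0 (data.length : Int)).reverse
        = nxtListG data 0 0 (data.length : Int) := by
      have h := nextScan_rev data 0 0 (data.length : Int)
      rw [zero_add] at h
      exact h
    rw [hnx]
    have h := bridge data data.length data 0 0 rfl (by simp) (by omega)
    simp only [Nat.cast_zero, zero_sub] at h
    exact h
  rw [hA, hB]
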